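-- pv_equiv track=rewrite | github.com/erictzeng/advent2019 | advent2019/day03.py | wire_distance
-- ===== SOURCE A (Python) =====
-- def intersection_pt(segment, pt):
--     segment = list(sorted(segment))
--     return segment[0][0] <= pt[0] <= segment[1][0] and segment[0][1] <= pt[1] <= segment[1][1]
--
-- def wire_distance(vertices, pt):
--     distance = 0
--     for i in range(len(vertices) - 1):
--         segment = vertices[i:i + 2]
--         if intersection_pt(segment, pt):
--             distance += abs(segment[0][0] - pt[0]) + abs(segment[0][1] - pt[1])
--             break
--         else:
--             distance += abs(segment[0][0] - segment[1][0]) + abs(segment[0][1] - segment[1][1])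
--     else:
--         raise ValueError
--     return distance
-- ===== SOURCE B (Python) =====
-- def wire_distance(vertices, pt):
--     x, y = pt
--     segs = list(zip(vertices, vertices[1:]))
--     prefix = [0]
--     for (x0, y0), (x1, y1) in segs:
--         prefix.append(prefix[-1] + abs(x0 - x1) + abs(y0 - y1))
--     for i, ((x0, y0), (x1, y1)) in enumerate(segs):
--         (ax, ay), (bx, by) = ((x0, y0), (x1, y1)) if (x0, y0) <= (x1, y1) else ((x1, y1), (x0, y0))
--         if ax <= x <= bx and ay <= y <= by:
--             return prefix[i] + abs(x0 - x) + abs(y0 - y)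
--     raise ValueError
-- ===== Notes on version B (the rewrite author's own statement) =====
-- stated objective: alternative
-- what changed: A accumulates the distance inside a single scan that stops at the first containing segment; B first builds a prefix-sum table of cumulative segment lengths in one pass over zipped vertex pairs, then a separate search pass finds the first containing segment and returns its prefix sum plus the partial distance from that segment's first vertex.
import Mathlib
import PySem

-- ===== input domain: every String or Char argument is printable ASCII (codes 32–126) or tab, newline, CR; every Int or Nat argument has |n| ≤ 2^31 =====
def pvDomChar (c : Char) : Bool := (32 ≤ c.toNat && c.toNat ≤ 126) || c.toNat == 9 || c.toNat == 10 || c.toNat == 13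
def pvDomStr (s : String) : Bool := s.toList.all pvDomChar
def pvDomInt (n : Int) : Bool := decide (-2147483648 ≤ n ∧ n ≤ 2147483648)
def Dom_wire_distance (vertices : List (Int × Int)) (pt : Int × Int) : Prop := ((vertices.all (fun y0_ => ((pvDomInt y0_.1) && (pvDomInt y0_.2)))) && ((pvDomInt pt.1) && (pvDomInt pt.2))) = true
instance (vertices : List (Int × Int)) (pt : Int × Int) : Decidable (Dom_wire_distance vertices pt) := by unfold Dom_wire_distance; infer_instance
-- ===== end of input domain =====

-- B replaces A's single accumulate-as-you-scan loop by a prefix-sum table of segment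
-- lengths built in one pass plus a separate first-hit search pass (objective: alternative).

-- ===== PORT A =====
-- Python's sorted on the two-element segment list = lexicographic swap of the two int pairs (exact)
def intersection_pt (s0 s1 : Int × Int) (pt : Int × Int) : Bool :=
  let srt := if s0.1 < s1.1 ∨ (s0.1 = s1.1 ∧ s0.2 ≤ s1.2) then (s0, s1) else (s1, s0)
  decide (srt.1.1 ≤ pt.1 ∧ pt.1 ≤ srt.2.1 ∧ srt.1.2 ≤ pt.2 ∧ pt.2 ≤ srt.2.2)

-- the for-loop over i in range(len(vertices)-1) with segment = vertices[i:i+2]: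
-- structural recursion over the successive vertex pairs, carrying `distance`
def wireA_go (pt : Int × Int) : List (Int × Int) → Int → Int
  | v0 :: v1 :: rest, distance =>
      if intersection_pt v0 v1 pt then distance + |v0.1 - pt.1| + |v0.2 - pt.2|
      else wireA_go pt (v1 :: rest) (distance + |v0.1 - v1.1| + |v0.2 - v1.2|)
  | _, _ => 0   -- Python: raise ValueError (excluded by Pre_)

def wire_distance (vertices : List (Int × Int)) (pt : Int × Int) : Int :=
  wireA_go pt vertices 0

-- ===== PORT B =====
-- pass 1 of Source B: prefix = [0]; for each segment append prefix[-1] + its length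
def wireB_prefix (segs : List ((Int × Int) × (Int × Int))) : List Int :=
  segs.foldl
    (fun pre s =>
      pre ++ [(PySem.List.pyGet? pre (-1)).getD 0 + |s.1.1 - s.2.1| + |s.1.2 - s.2.2|])
    [0]

-- pass 2 of Source B: enumerate(segs), first segment whose lex-sorted box contains pt
def wireB_find (pt : Int × Int) (pre : List Int) : List ((Int × Int) × (Int × Int)) → Nat → Option Int
  | [], _ => none
  | s :: rest, i =>
      let srt := if s.1.1 < s.2.1 ∨ (s.1.1 = s.2.1 ∧ s.1.2 ≤ s.2.2) then (s.1, s.2) else (s.2, s.1)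
      if srt.1.1 ≤ pt.1 ∧ pt.1 ≤ srt.2.1 ∧ srt.1.2 ≤ pt.2 ∧ pt.2 ≤ srt.2.2 then
        some ((PySem.List.pyGet? pre (i : Int)).getD 0 + |s.1.1 - pt.1| + |s.1.2 - pt.2|)
      else wireB_find pt pre rest (i + 1)

def wire_distance_alt (vertices : List (Int × Int)) (pt : Int × Int) : Int :=
  let segs := vertices.zip (PySem.List.slice vertices (some 1) none)   -- zip(vertices, vertices[1:])
  match wireB_find pt (wireB_prefix segs) segs 0 with
  | some r => r
  | none => 0   -- Python: raise ValueError (excluded by Pre_)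

-- ===== PRECONDITION & SPEC =====
-- A (and B) raise ValueError when no segment's lex-sorted box contains pt (in particular
-- when vertices has fewer than two entries); Pre_ is exactly "some segment contains pt".
def Pre_wire_distance (vertices : List (Int × Int)) (pt : Int × Int) : Prop :=
  ∃ s ∈ vertices.zip vertices.tail,
    (if s.1.1 < s.2.1 ∨ (s.1.1 = s.2.1 ∧ s.1.2 ≤ s.2.2)
     then s.1.1 ≤ pt.1 ∧ pt.1 ≤ s.2.1 ∧ s.1.2 ≤ pt.2 ∧ pt.2 ≤ s.2.2
     else s.2.1 ≤ pt.1 ∧ pt.1 ≤ s.1.1 ∧ s.2.2 ≤ pt.2 ∧ pt.2 ≤ s.1.2)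
instance (vertices : List (Int × Int)) (pt : Int × Int) : Decidable (Pre_wire_distance vertices pt) := by
  unfold Pre_wire_distance; infer_instance

def pvWitness_wire_distance : (List (Int × Int)) × (Int × Int) := ([(0, 0), (5, 0)], (2, 0))

def Spec_wire_distance (vertices : List (Int × Int)) (pt : Int × Int) (out : Int) : Prop := out = wire_distance_alt vertices pt
instance (vertices : List (Int × Int)) (pt : Int × Int) (out : Int) : Decidable (Spec_wire_distance vertices pt out) := by unfold Spec_wire_distance; infer_instance

-- ===== CLAIM (what is proved, stated in full; the proofs are below) =====
def Claim_equal_wire_distance : Prop := ∀ (vertices : List (Int × Int)) (pt : Int × Int), Dom_wire_distance vertices pt → Pre_wire_distance vertices pt → Spec_wire_distance vertices pt (wire_distance vertices pt)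

-- ===== LEMMAS AND PROOFS =====

-- cumulative segment lengths from a running total c (proof-side view of B's prefix table)
def pvScan : Int → List ((Int × Int) × (Int × Int)) → List Int
  | _, [] => []
  | c, s :: r => (c + |s.1.1 - s.2.1| + |s.1.2 - s.2.2|) :: pvScan (c + |s.1.1 - s.2.1| + |s.1.2 - s.2.2|) r

-- A's loop restated on the list of segments (proof-side)
def pvGoSegs (pt : Int × Int) : List ((Int × Int) × (Int × Int)) → Int → Int
  | [], _ => 0
  | s :: r, d =>
      if intersection_pt s.1 s.2 pt then d + |s.1.1 - pt.1| + |s.1.2 - pt.2|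
      else pvGoSegs pt r (d + |s.1.1 - s.2.1| + |s.1.2 - s.2.2|)

theorem wireB_prefix_fold (segs : List ((Int × Int) × (Int × Int))) :
    ∀ (acc : List Int) (c : Int),
      segs.foldl
        (fun pre s =>
          pre ++ [(PySem.List.pyGet? pre (-1)).getD 0 + |s.1.1 - s.2.1| + |s.1.2 - s.2.2|])
        (acc ++ [c]) = (acc ++ [c]) ++ pvScan c segs := by
  induction segs with
  | nil => intro acc c; simp [pvScan]
  | cons s r ih =>
      intro acc c
      simp only [List.foldl_cons, PySem.List.pyGet?_neg_one_append_singleton, Option.getD_some]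
      rw [show acc ++ [c] ++ [c + |s.1.1 - s.2.1| + |s.1.2 - s.2.2|]
            = (acc ++ [c]) ++ [c + |s.1.1 - s.2.1| + |s.1.2 - s.2.2|] from rfl]
      rw [ih (acc ++ [c]) (c + |s.1.1 - s.2.1| + |s.1.2 - s.2.2|)]
      simp [pvScan]

theorem wireB_prefix_eq (segs : List ((Int × Int) × (Int × Int))) :
    wireB_prefix segs = 0 :: pvScan 0 segs := by
  have h := wireB_prefix_fold segs [] 0
  simpa [wireB_prefix] using h

theorem wireB_find_eq (pt : Int × Int) :
    ∀ (segs : List ((Int × Int) × (Int × Int))) (P : List Int) (i : Nat) (d : Int),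
      P.drop i = d :: pvScan d segs →
      (wireB_find pt P segs i).getD 0 = pvGoSegs pt segs d := by
  intro segs
  induction segs with
  | nil => intro P i d _; simp [wireB_find, pvGoSegs]
  | cons s r ih =>
      intro P i d hdrop
      have hPi : PySem.List.pyGet? P (i : Int) = some d := by
        rw [PySem.List.pyGet?_natCast]
        have : (P.drop i)[0]? = some d := by rw [hdrop]; rfl
        simpa [List.getElem?_drop] using this
      have hnext : P.drop (i + 1) = (d + |s.1.1 - s.2.1| + |s.1.2 - s.2.2|)
          :: pvScan (d + |s.1.1 - s.2.1| + |s.1.2 - s.2.2|) r := by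
        rw [← List.tail_drop, hdrop]; simp [pvScan]
      by_cases hlex : s.1.1 < s.2.1 ∨ (s.1.1 = s.2.1 ∧ s.1.2 ≤ s.2.2)
      · by_cases hbox : s.1.1 ≤ pt.1 ∧ pt.1 ≤ s.2.1 ∧ s.1.2 ≤ pt.2 ∧ pt.2 ≤ s.2.2
        · simp [wireB_find, pvGoSegs, intersection_pt, hlex, hbox, hPi]
        · simp only [wireB_find, pvGoSegs, intersection_pt, hlex, if_pos]
          simp [hbox, ih P (i + 1) _ hnext]
      · by_cases hbox : s.2.1 ≤ pt.1 ∧ pt.1 ≤ s.1.1 ∧ s.2.2 ≤ pt.2 ∧ pt.2 ≤ s.1.2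
        · simp [wireB_find, pvGoSegs, intersection_pt, hlex, hbox, hPi]
        · simp [wireB_find, pvGoSegs, intersection_pt, hlex, hbox, ih P (i + 1) _ hnext]

theorem wireA_go_eq (pt : Int × Int) :
    ∀ (l : List (Int × Int)) (d : Int),
      wireA_go pt l d = pvGoSegs pt (l.zip l.tail) d := by
  intro l
  induction l with
  | nil => intro d; simp [wireA_go, pvGoSegs]
  | cons v0 rest ih =>
      intro d
      cases rest with
      | nil => simp [wireA_go, pvGoSegs]
      | cons v1 r =>
          simp only [List.tail_cons, List.zip_cons_cons, pvGoSegs, wireA_go]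
          by_cases h : intersection_pt v0 v1 pt
          · simp [h]
          · simp [h, ih]

theorem wire_distance_eq_alt (vertices : List (Int × Int)) (pt : Int × Int) :
    wire_distance vertices pt = wire_distance_alt vertices pt := by
  unfold wire_distance wire_distance_alt
  dsimp only
  rw [PySem.List.slice_from_one, wireB_prefix_eq]
  have hfind := wireB_find_eq pt (vertices.zip vertices.tail)
      (0 :: pvScan 0 (vertices.zip vertices.tail)) 0 0 (by simp)
  rw [wireA_go_eq pt vertices 0, ← hfind]
  cases wireB_find pt (0 :: pvScan 0 (vertices.zip vertices.tail)) (vertices.zip vertices.tail) 0 <;> simp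

-- ===== VERDICT (by name: the statement is the Claim_ definition above) =====
theorem wire_distance_spec : Claim_equal_wire_distance := by
  intro vertices pt _ _
  unfold Spec_wire_distance
  exact wire_distance_eq_alt vertices pt
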